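-- pv_equiv track=rewrite | github.com/sharibox/annotationTools | json2maskImage.py | clearArray_zeroBound
-- ===== SOURCE A (Python) =====
-- def check(list1, val):
--     return(all(x > val for x in list1))
--
-- def clearArray_zeroBound (xval_artefact, yval_artefact, val):
--     for i in range (len(xval_artefact)):
-- #        check if its greater than certain value
--         if (check(xval_artefact[i], val) == False or check(yval_artefact[i], val) == False):
--             j2 = list(filter(lambda x: x < val, xval_artefact[i]))
--             for j in range (len(j2)):
--                 ind=xval_artefact[i].index(j2[j])
--                 del xval_artefact[i][ind]
--                 del yval_artefact[i][ind]
--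
--             j3 = list(filter(lambda x: x < val, yval_artefact[i]))
--             for j in range (len(j3)):
--                 ind=yval_artefact[i].index(j3[j])
--                 del xval_artefact[i][ind]
--                 del yval_artefact[i][ind]
--
--     return xval_artefact, yval_artefact
-- ===== SOURCE B (Python) =====
-- def clearArray_zeroBound(xval_artefact, yval_artefact, val):
--     # Single linear two-pointer compaction per row instead of A's repeated
--     # .index/del scans; mutates the same list objects in place, like A.
--     for i in range(len(xval_artefact)):
--         xs = xval_artefact[i]
--         ys = yval_artefact[i]
--         w = 0
--         for r in range(len(xs)):
--             if not (xs[r] < val) and not (ys[r] < val):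
--                 xs[w] = xs[r]
--                 ys[w] = ys[r]
--                 w += 1
--         del xs[w:]
--         del ys[w:]
--     return xval_artefact, yval_artefact
-- ===== Notes on version B (the rewrite author's own statement) =====
-- stated objective: faster
-- what changed: Replaces A's per-row double pass of filter + repeated list.index/del scans with a single linear two-pointer in-place compaction per row that keeps exactly the pairs with x >= val and y >= val.
-- outside the precondition, e.g. on clearArray_zeroBound([[5]], [[5, 6]], 3): A returns ([[5]], [[5, 6]]), B returns ([[5]], [[5]])
import Mathlib
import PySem

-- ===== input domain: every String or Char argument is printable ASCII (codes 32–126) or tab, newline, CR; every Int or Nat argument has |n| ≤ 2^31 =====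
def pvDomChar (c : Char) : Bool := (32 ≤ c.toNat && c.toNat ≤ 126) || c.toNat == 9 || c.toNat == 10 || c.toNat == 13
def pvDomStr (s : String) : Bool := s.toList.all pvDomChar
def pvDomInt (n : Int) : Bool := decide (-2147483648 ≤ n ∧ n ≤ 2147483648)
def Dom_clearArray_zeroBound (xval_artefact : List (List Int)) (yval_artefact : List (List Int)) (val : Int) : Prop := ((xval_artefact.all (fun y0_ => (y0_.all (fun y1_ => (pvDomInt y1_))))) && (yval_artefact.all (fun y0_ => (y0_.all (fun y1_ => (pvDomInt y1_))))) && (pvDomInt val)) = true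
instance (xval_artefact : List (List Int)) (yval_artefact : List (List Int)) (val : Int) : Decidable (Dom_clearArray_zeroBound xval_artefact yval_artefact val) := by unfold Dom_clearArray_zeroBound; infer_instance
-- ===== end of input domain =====

-- B replaces A's per-row filter + repeated .index/del scans by one linear two-pointer
-- compaction per row (faster); equivalence is about the RETURN value only — both Pythons
-- mutate the argument lists in place.

-- ===== PORT A =====

-- helper `check(list1, val)`: all(x > val for x in list1)
def pvCheck (list1 : List Int) (val : Int) : Bool := list1.all (fun x => decide (val < x))

-- the inner `for j in range(len(j2))` loop: for each value v, ind = p.1.index(v); del p.1[ind]; del p.2[ind]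
def pvDelByFst (vs : List Int) (p : List Int × List Int) : List Int × List Int :=
  vs.foldl (fun p v =>
    match PySem.List.index? p.1 v with
    | some ind => (p.1.eraseIdx ind, p.2.eraseIdx ind)
    | none => p) p   -- none unreachable in A (a missing value would raise ValueError)

-- the second inner loop: ind = p.2.index(v); del p.1[ind]; del p.2[ind]
def pvDelBySnd (vs : List Int) (p : List Int × List Int) : List Int × List Int :=
  vs.foldl (fun p v =>
    match PySem.List.index? p.2 v with
    | some ind => (p.1.eraseIdx ind, p.2.eraseIdx ind)
    | none => p) p

-- body of one iteration of A's outer loop (the two filter+delete passes on row i)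
def pvRowA (xs ys : List Int) (val : Int) : List Int × List Int :=
  let j2 := xs.filter (fun x => decide (x < val))
  let p1 := pvDelByFst j2 (xs, ys)
  let j3 := p1.2.filter (fun x => decide (x < val))
  pvDelBySnd j3 p1

def clearArray_zeroBound (xval_artefact : List (List Int)) (yval_artefact : List (List Int)) (val : Int) : List (List Int) × List (List Int) :=
  (List.range xval_artefact.length).foldl (fun (st : List (List Int) × List (List Int)) i =>
    let xs := st.1.getD i []
    let ys := st.2.getD i []
    if pvCheck xs val = false ∨ pvCheck ys val = false then
      let r := pvRowA xs ys val
      (st.1.set i r.1, st.2.set i r.2)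
    else st) (xval_artefact, yval_artefact)

-- ===== PORT B =====

-- loop body of B's inner `for r in range(len(xs))` pass (st = (xs, ys, w))
def pvRowBStep (val : Int) (st : List Int × List Int × Nat) (r : Nat) : List Int × List Int × Nat :=
  let xr := st.1.getD r 0
  let yr := st.2.1.getD r 0
  if ¬ xr < val ∧ ¬ yr < val then
    (st.1.set st.2.2 xr, st.2.1.set st.2.2 yr, st.2.2 + 1)
  else st

-- one row: single pass with write index w, then truncation `del xs[w:]` / `del ys[w:]`
def pvRowB (xs ys : List Int) (val : Int) : List Int × List Int :=
  let st := (List.range xs.length).foldl (pvRowBStep val) (xs, ys, 0)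
  (st.1.take st.2.2, st.2.1.take st.2.2)

def clearArray_zeroBound_alt (xval_artefact : List (List Int)) (yval_artefact : List (List Int)) (val : Int) : List (List Int) × List (List Int) :=
  (List.range xval_artefact.length).foldl (fun (st : List (List Int) × List (List Int)) i =>
    let r := pvRowB (st.1.getD i []) (st.2.getD i []) val
    (st.1.set i r.1, st.2.set i r.2)) (xval_artefact, yval_artefact)

-- ===== PRECONDITION & SPEC =====
-- Pre_ excludes ragged inputs (fewer y-rows than x-rows, or a row pair of unequal
-- lengths): there A either raises IndexError or returns with stray unpaired
-- y-coordinates, an artefact no caller of paired coordinate rows can rely on.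
def Pre_clearArray_zeroBound (xval_artefact : List (List Int)) (yval_artefact : List (List Int)) (val : Int) : Prop :=
  xval_artefact.length ≤ yval_artefact.length ∧
  ∀ i < xval_artefact.length, (xval_artefact.getD i []).length = (yval_artefact.getD i []).length

instance (xval_artefact : List (List Int)) (yval_artefact : List (List Int)) (val : Int) : Decidable (Pre_clearArray_zeroBound xval_artefact yval_artefact val) := by unfold Pre_clearArray_zeroBound; infer_instance

def pvWitness_clearArray_zeroBound : List (List Int) × List (List Int) × Int := ([[1, 5], [3]], [[4, 0], [7]], 2)

def Spec_clearArray_zeroBound (xval_artefact : List (List Int)) (yval_artefact : List (List Int)) (val : Int) (out : List (List Int) × List (List Int)) : Prop := out = clearArray_zeroBound_alt xval_artefact yval_artefact val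
instance (xval_artefact : List (List Int)) (yval_artefact : List (List Int)) (val : Int) (out : List (List Int) × List (List Int)) : Decidable (Spec_clearArray_zeroBound xval_artefact yval_artefact val out) := by unfold Spec_clearArray_zeroBound; infer_instance

-- ===== CLAIM (what is proved, stated in full; the proofs are below) =====
def Claim_equal_clearArray_zeroBound : Prop := ∀ (xval_artefact : List (List Int)) (yval_artefact : List (List Int)) (val : Int), Dom_clearArray_zeroBound xval_artefact yval_artefact val → Pre_clearArray_zeroBound xval_artefact yval_artefact val → Spec_clearArray_zeroBound xval_artefact yval_artefact val (clearArray_zeroBound xval_artefact yval_artefact val)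

-- ===== LEMMAS AND PROOFS =====

-- the common row value: keep the pairs with x ≥ val and y ≥ val
def pvKeep (xs ys : List Int) (val : Int) : List Int × List Int :=
  let ps := (xs.zip ys).filter (fun p => !decide (p.1 < val) && !decide (p.2 < val))
  (ps.map Prod.fst, ps.map Prod.snd)

def pvKeep1 (xs ys : List Int) (val : Int) : List Int × List Int :=
  let ps := (xs.zip ys).filter (fun p => !decide (p.1 < val))
  (ps.map Prod.fst, ps.map Prod.snd)

def pvKeep2 (xs ys : List Int) (val : Int) : List Int × List Int :=
  let ps := (xs.zip ys).filter (fun p => !decide (p.2 < val))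
  (ps.map Prod.fst, ps.map Prod.snd)

theorem delByFst_cons (vs : List Int) (x y : Int) (X Y : List Int)
    (h : ∀ v ∈ vs, v ≠ x) :
    pvDelByFst vs (x :: X, y :: Y) =
      (x :: (pvDelByFst vs (X, Y)).1, y :: (pvDelByFst vs (X, Y)).2) := by
  induction vs generalizing X Y with
  | nil => rfl
  | cons v vs ih =>
    have hvx : x ≠ v := fun hx => (h v (by simp)) hx.symm
    simp only [pvDelByFst, List.foldl_cons, PySem.List.index?_cons_of_ne X hvx]
    cases hidx : PySem.List.index? X v with
    | none =>
      simp only [Option.map_none]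
      exact ih X Y (fun w hw => h w (by simp [hw]))
    | some i =>
      simp only [Option.map_some, List.eraseIdx_cons_succ]
      exact ih _ _ (fun w hw => h w (by simp [hw]))

theorem delByFst_cons_head (vs : List Int) (x y : Int) (X Y : List Int) :
    pvDelByFst (x :: vs) (x :: X, y :: Y) = pvDelByFst vs (X, Y) := by
  simp only [pvDelByFst, List.foldl_cons, PySem.List.index?_cons_self, List.eraseIdx_cons_zero]

theorem delBySnd_cons_head (vs : List Int) (x y : Int) (X Y : List Int) :
    pvDelBySnd (y :: vs) (x :: X, y :: Y) = pvDelBySnd vs (X, Y) := by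
  simp only [pvDelBySnd, List.foldl_cons, PySem.List.index?_cons_self, List.eraseIdx_cons_zero]

theorem pass1_eq (xs : List Int) (val : Int) : ∀ ys : List Int, xs.length = ys.length →
    pvDelByFst (xs.filter (fun x => decide (x < val))) (xs, ys) = pvKeep1 xs ys val := by
  induction xs with
  | nil =>
    intro ys h
    cases ys with
    | nil => rfl
    | cons y ys => simp at h
  | cons x xs ih =>
    intro ys h
    cases ys with
    | nil => simp at h
    | cons y ys =>
      have hlen : xs.length = ys.length := by simpa using h
      by_cases hx : x < val
      · simp only [List.filter_cons]
        rw [if_pos (decide_eq_true hx), delByFst_cons_head, ih ys hlen]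
        simp [pvKeep1, hx]
      · simp only [List.filter_cons]
        rw [if_neg (by simp [hx]), delByFst_cons _ x y xs ys ?hne, ih ys hlen]
        · simp [pvKeep1, hx]
        case hne =>
          intro v hv hvx
          exact hx (hvx ▸ (by simpa using (List.of_mem_filter hv)))

theorem delBySnd_cons (vs : List Int) (x y : Int) (X Y : List Int)
    (h : ∀ v ∈ vs, v ≠ y) :
    pvDelBySnd vs (x :: X, y :: Y) =
      (x :: (pvDelBySnd vs (X, Y)).1, y :: (pvDelBySnd vs (X, Y)).2) := by
  induction vs generalizing X Y with
  | nil => rfl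
  | cons v vs ih =>
    have hvy : y ≠ v := fun hy => (h v (by simp)) hy.symm
    simp only [pvDelBySnd, List.foldl_cons, PySem.List.index?_cons_of_ne Y hvy]
    cases hidx : PySem.List.index? Y v with
    | none =>
      simp only [Option.map_none]
      exact ih X Y (fun w hw => h w (by simp [hw]))
    | some i =>
      simp only [Option.map_some, List.eraseIdx_cons_succ]
      exact ih _ _ (fun w hw => h w (by simp [hw]))

theorem pass2_eq (ys : List Int) (val : Int) : ∀ xs : List Int, xs.length = ys.length →
    pvDelBySnd (ys.filter (fun x => decide (x < val))) (xs, ys) = pvKeep2 xs ys val := by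
  induction ys with
  | nil =>
    intro xs h
    cases xs with
    | nil => rfl
    | cons x xs => simp at h
  | cons y ys ih =>
    intro xs h
    cases xs with
    | nil => simp at h
    | cons x xs =>
      have hlen : xs.length = ys.length := by simpa using h
      by_cases hy : y < val
      · simp only [List.filter_cons]
        rw [if_pos (decide_eq_true hy), delBySnd_cons_head, ih xs hlen]
        simp [pvKeep2, hy]
      · simp only [List.filter_cons]
        rw [if_neg (by simp [hy]), delBySnd_cons _ x y xs ys ?hne, ih xs hlen]
        · simp [pvKeep2, hy]
        case hne =>
          intro v hv hvy
          exact hy (hvy ▸ (by simpa using (List.of_mem_filter hv)))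

theorem rowA_eq (xs ys : List Int) (val : Int) (h : xs.length = ys.length) :
    pvRowA xs ys val = pvKeep xs ys val := by
  show pvDelBySnd ((pvDelByFst (xs.filter (fun x => decide (x < val))) (xs, ys)).2.filter
      (fun x => decide (x < val))) (pvDelByFst (xs.filter (fun x => decide (x < val))) (xs, ys)) = pvKeep xs ys val
  rw [pass1_eq xs val ys h, pass2_eq _ val _ (by simp [pvKeep1])]
  simp only [pvKeep1, pvKeep2, pvKeep, List.zip_map']
  have : (fun x : Int × Int => (x.1, x.2)) = id := by funext p; rfl
  rw [this, List.map_id]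
  rw [List.filter_filter, List.filter_congr (fun p _ => by
    show (!decide (p.2 < val) && !decide (p.1 < val)) = (!decide (p.1 < val) && !decide (p.2 < val))
    exact Bool.and_comm _ _)]

theorem keep_all (xs ys : List Int) (val : Int) (h : xs.length = ys.length)
    (hx : pvCheck xs val = true) (hy : pvCheck ys val = true) :
    pvKeep xs ys val = (xs, ys) := by
  have h1 : ∀ p ∈ xs.zip ys, (!decide (p.1 < val) && !decide (p.2 < val)) = true := by
    intro p hp
    have hx' : val < p.1 := by
      have := List.all_eq_true.mp hx _ ((List.of_mem_zip (by exact hp)).1)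
      simpa using this
    have hy' : val < p.2 := by
      have := List.all_eq_true.mp hy _ ((List.of_mem_zip (by exact hp)).2)
      simpa using this
    simp [not_lt.mpr hx'.le, not_lt.mpr hy'.le]
  unfold pvKeep
  simp only [List.filter_eq_self.mpr h1]
  rw [List.map_fst_zip h.le, List.map_snd_zip h.ge]

theorem rowB_inv (xs ys : List Int) (val : Int) (h : xs.length = ys.length)
    (k : Nat) (hk : k ≤ xs.length) :
    ((List.range k).foldl (pvRowBStep val) (xs, ys, 0)).1.length = xs.length ∧
    ((List.range k).foldl (pvRowBStep val) (xs, ys, 0)).2.1.length = ys.length ∧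
    ((List.range k).foldl (pvRowBStep val) (xs, ys, 0)).2.2 = (pvKeep (xs.take k) (ys.take k) val).1.length ∧
    ((List.range k).foldl (pvRowBStep val) (xs, ys, 0)).2.2 ≤ k ∧
    ((List.range k).foldl (pvRowBStep val) (xs, ys, 0)).1.take ((List.range k).foldl (pvRowBStep val) (xs, ys, 0)).2.2 = (pvKeep (xs.take k) (ys.take k) val).1 ∧
    ((List.range k).foldl (pvRowBStep val) (xs, ys, 0)).2.1.take ((List.range k).foldl (pvRowBStep val) (xs, ys, 0)).2.2 = (pvKeep (xs.take k) (ys.take k) val).2 ∧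
    ((List.range k).foldl (pvRowBStep val) (xs, ys, 0)).1.drop k = xs.drop k ∧
    ((List.range k).foldl (pvRowBStep val) (xs, ys, 0)).2.1.drop k = ys.drop k := by
  induction k with
  | zero => simp [pvKeep]
  | succ k ih =>
    have hk' : k < xs.length := Nat.lt_of_succ_le hk
    obtain ⟨hlX, hlY, hw, hwk, htX, htY, hdX, hdY⟩ := ih (Nat.le_of_lt hk')
    set S := (List.range k).foldl (pvRowBStep val) (xs, ys, 0) with hS
    rw [List.range_succ, List.foldl_append, List.foldl_cons, List.foldl_nil, ← hS]
    have hk'y : k < ys.length := h ▸ hk'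
    -- the element read at position k is the original one
    have hXk : S.1[k]? = some (xs[k]'hk') := by
      have h1 : (S.1.drop k)[0]? = (xs.drop k)[0]? := by rw [hdX]
      simpa [List.getElem?_drop, List.getElem?_eq_getElem hk'] using h1
    have hYk : S.2.1[k]? = some (ys[k]'hk'y) := by
      have h1 : (S.2.1.drop k)[0]? = (ys.drop k)[0]? := by rw [hdY]
      simpa [List.getElem?_drop, List.getElem?_eq_getElem hk'y] using h1
    have hgX : S.1.getD k 0 = xs[k]'hk' := by simp [List.getD, hXk]
    have hgY : S.2.1.getD k 0 = ys[k]'hk'y := by simp [List.getD, hYk]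
    -- take (k+1) splits off element k
    have hTX : xs.take (k + 1) = xs.take k ++ [xs[k]'hk'] := by
      rw [List.take_succ, List.getElem?_eq_getElem hk']; rfl
    have hTY : ys.take (k + 1) = ys.take k ++ [ys[k]'hk'y] := by
      rw [List.take_succ, List.getElem?_eq_getElem hk'y]; rfl
    have hzlen : (xs.take k).length = (ys.take k).length := by
      simp [Nat.le_of_lt hk', Nat.le_of_lt hk'y]
    have hKsplit' :
        (pvKeep (xs.take (k+1)) (ys.take (k+1)) val) =
        (let tl := (List.filter (fun p => !decide (p.1 < val) && !decide (p.2 < val)) [(xs[k]'hk', ys[k]'hk'y)]);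
         ((pvKeep (xs.take k) (ys.take k) val).1 ++ tl.map Prod.fst,
          (pvKeep (xs.take k) (ys.take k) val).2 ++ tl.map Prod.snd)) := by
      simp only [pvKeep, hTX, hTY, List.zip_append hzlen, List.filter_append, List.map_append]
      rfl
    by_cases hc : ¬ (xs[k]'hk') < val ∧ ¬ (ys[k]'hk'y) < val
    · -- pair kept: write at w, bump w
      have hstep : pvRowBStep val S k =
          (S.1.set S.2.2 (xs[k]'hk'), S.2.1.set S.2.2 (ys[k]'hk'y), S.2.2 + 1) := by
        simp only [pvRowBStep, hgX, hgY, if_pos hc]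
      rw [hstep]
      have hwX : S.2.2 < S.1.length := by omega
      have hwY : S.2.2 < S.2.1.length := by rw [hlY, ← h]; omega
      have hfil : (List.filter (fun p : Int × Int => !decide (p.1 < val) && !decide (p.2 < val)) [(xs[k]'hk', ys[k]'hk'y)]) = [(xs[k]'hk', ys[k]'hk'y)] := by
        simp [hc.1, hc.2]
      have hsetX : (S.1.set S.2.2 (xs[k]'hk')).take (S.2.2 + 1) = S.1.take S.2.2 ++ [xs[k]'hk'] := by
        rw [List.set_eq_take_append_cons_drop, if_pos hwX]
        have : S.2.2 + 1 = (S.1.take S.2.2).length + 1 := by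
          simp [Nat.le_of_lt hwX]
        rw [this, List.take_append]
        simp
      have hsetY : (S.2.1.set S.2.2 (ys[k]'hk'y)).take (S.2.2 + 1) = S.2.1.take S.2.2 ++ [ys[k]'hk'y] := by
        rw [List.set_eq_take_append_cons_drop, if_pos hwY]
        have : S.2.2 + 1 = (S.2.1.take S.2.2).length + 1 := by
          simp [Nat.le_of_lt hwY]
        rw [this, List.take_append]
        simp
      have hdX' : List.drop (k + 1) S.1 = List.drop (k + 1) xs := by
        have := congrArg (List.drop 1) hdX
        simpa [List.drop_drop, Nat.add_comm 1 k] using this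
      have hdY' : List.drop (k + 1) S.2.1 = List.drop (k + 1) ys := by
        have := congrArg (List.drop 1) hdY
        simpa [List.drop_drop, Nat.add_comm 1 k] using this
      refine ⟨by simpa using hlX, by simpa using hlY, ?_, ?_, ?_, ?_, ?_, ?_⟩
      · show S.2.2 + 1 = _
        rw [hKsplit', hfil]; simp [hw]
      · show S.2.2 + 1 ≤ k + 1; omega
      · show (S.1.set S.2.2 (xs[k]'hk')).take (S.2.2 + 1) = _
        rw [hKsplit', hfil, hsetX, htX]; simp
      · show (S.2.1.set S.2.2 (ys[k]'hk'y)).take (S.2.2 + 1) = _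
        rw [hKsplit', hfil, hsetY, htY]; simp
      · show (S.1.set S.2.2 (xs[k]'hk')).drop (k + 1) = _
        rw [List.drop_set, if_pos (by omega : S.2.2 < k + 1), hdX']
      · show (S.2.1.set S.2.2 (ys[k]'hk'y)).drop (k + 1) = _
        rw [List.drop_set, if_pos (by omega : S.2.2 < k + 1), hdY']
    · -- pair dropped: state unchanged
      have hstep : pvRowBStep val S k = S := by
        simp only [pvRowBStep, hgX, hgY, if_neg hc]
      rw [hstep]
      have hfil : (List.filter (fun p : Int × Int => !decide (p.1 < val) && !decide (p.2 < val)) [(xs[k]'hk', ys[k]'hk'y)]) = [] := by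
        by_cases h1 : (xs[k]'hk') < val
        · simp [h1]
        · have h2 : (ys[k]'hk'y) < val := by
            by_contra h2; exact hc ⟨h1, h2⟩
          simp [h2]
      refine ⟨hlX, hlY, ?_, by omega, ?_, ?_, ?_, ?_⟩
      · rw [hKsplit', hfil]; simp [hw]
      · rw [hKsplit', hfil]; simp [htX]
      · rw [hKsplit', hfil]; simp [htY]
      · have := congrArg (List.drop 1) hdX
        simpa [List.drop_drop, Nat.add_comm 1 k] using this
      · have := congrArg (List.drop 1) hdY
        simpa [List.drop_drop, Nat.add_comm 1 k] using this

theorem rowB_eq (xs ys : List Int) (val : Int) (h : xs.length = ys.length) :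
    pvRowB xs ys val = pvKeep xs ys val := by
  obtain ⟨hlX, hlY, hw, hwk, htX, htY, hdX, hdY⟩ :=
    rowB_inv xs ys val h xs.length (Nat.le_refl _)
  have hdef : pvRowB xs ys val =
      (List.take (List.foldl (pvRowBStep val) (xs, ys, 0) (List.range xs.length)).2.2
        (List.foldl (pvRowBStep val) (xs, ys, 0) (List.range xs.length)).1,
       List.take (List.foldl (pvRowBStep val) (xs, ys, 0) (List.range xs.length)).2.2
        (List.foldl (pvRowBStep val) (xs, ys, 0) (List.range xs.length)).2.1) := rfl
  rw [hdef, htX, htY, List.take_length, h, List.take_length]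

theorem set_getD_self (l : List (List Int)) (i : Nat) (hi : i < l.length) :
    l.set i (l.getD i []) = l := by
  apply List.ext_getElem (by simp)
  intro j h1 h2
  rw [List.getElem_set]
  split
  · next hij => subst hij; exact (List.getD_eq_getElem l [] hi).symm ▸ rfl
  · rfl

-- the outer loop bodies of the two ports, named for the proofs
def pvStepA (val : Int) (st : List (List Int) × List (List Int)) (i : Nat) : List (List Int) × List (List Int) :=
  let xs := st.1.getD i []
  let ys := st.2.getD i []
  if pvCheck xs val = false ∨ pvCheck ys val = false then
    let r := pvRowA xs ys val
    (st.1.set i r.1, st.2.set i r.2)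
  else st

def pvStepB (val : Int) (st : List (List Int) × List (List Int)) (i : Nat) : List (List Int) × List (List Int) :=
  let r := pvRowB (st.1.getD i []) (st.2.getD i []) val
  (st.1.set i r.1, st.2.set i r.2)

theorem portA_def (xval yval : List (List Int)) (val : Int) :
    clearArray_zeroBound xval yval val = (List.range xval.length).foldl (pvStepA val) (xval, yval) := rfl

theorem portB_def (xval yval : List (List Int)) (val : Int) :
    clearArray_zeroBound_alt xval yval val = (List.range xval.length).foldl (pvStepB val) (xval, yval) := rfl

theorem stepAB (val : Int) (st : List (List Int) × List (List Int)) (i : Nat)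
    (hi1 : i < st.1.length) (hi2 : i < st.2.length)
    (hl : (st.1.getD i []).length = (st.2.getD i []).length) :
    pvStepA val st i = pvStepB val st i := by
  unfold pvStepA pvStepB
  by_cases hc : pvCheck (st.1.getD i []) val = false ∨ pvCheck (st.2.getD i []) val = false
  · rw [if_pos hc]
    rw [rowA_eq _ _ _ hl, rowB_eq _ _ _ hl]
  · rw [if_neg hc]
    rw [not_or] at hc
    have h1' : pvCheck (st.1.getD i []) val = true := by
      simpa using hc.1
    have h2' : pvCheck (st.2.getD i []) val = true := by
      simpa using hc.2
    rw [rowB_eq _ _ _ hl, keep_all _ _ _ hl h1' h2']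
    show st = (st.1.set i (st.1.getD i []), st.2.set i (st.2.getD i []))
    rw [set_getD_self _ _ hi1, set_getD_self _ _ hi2]

theorem outer_inv (xval yval : List (List Int)) (val : Int)
    (hlen : xval.length ≤ yval.length)
    (hrow : ∀ i < xval.length, (xval.getD i []).length = (yval.getD i []).length)
    (k : Nat) (hk : k ≤ xval.length) :
    (List.range k).foldl (pvStepA val) (xval, yval) = (List.range k).foldl (pvStepB val) (xval, yval) ∧
    ((List.range k).foldl (pvStepB val) (xval, yval)).1.length = xval.length ∧
    ((List.range k).foldl (pvStepB val) (xval, yval)).2.length = yval.length ∧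
    (∀ j, k ≤ j → ((List.range k).foldl (pvStepB val) (xval, yval)).1.getD j [] = xval.getD j [] ∧
                   ((List.range k).foldl (pvStepB val) (xval, yval)).2.getD j [] = yval.getD j []) := by
  induction k with
  | zero => exact ⟨rfl, rfl, rfl, fun j _ => ⟨rfl, rfl⟩⟩
  | succ k ih =>
    have hk' : k < xval.length := Nat.lt_of_succ_le hk
    obtain ⟨hAB, hl1, hl2, hpres⟩ := ih (Nat.le_of_lt hk')
    set S := (List.range k).foldl (pvStepB val) (xval, yval) with hS
    obtain ⟨hg1, hg2⟩ := hpres k (Nat.le_refl k)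
    have hi1 : k < S.1.length := by omega
    have hi2 : k < S.2.length := by omega
    have hl : (S.1.getD k []).length = (S.2.getD k []).length := by
      rw [hg1, hg2]; exact hrow k hk'
    have hstep := stepAB val S k hi1 hi2 hl
    rw [List.range_succ, List.foldl_append, List.foldl_cons, List.foldl_nil,
        List.foldl_append, List.foldl_cons, List.foldl_nil, hAB, ← hS, hstep]
    have hBlen1 : (pvStepB val S k).1.length = S.1.length := by
      simp [pvStepB]
    have hBlen2 : (pvStepB val S k).2.length = S.2.length := by
      simp [pvStepB]
    refine ⟨rfl, by omega, by omega, ?_⟩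
    intro j hj
    have hkj : k ≠ j := by omega
    have e1 : (pvStepB val S k).1.getD j [] = S.1.getD j [] := by
      simp only [pvStepB]
      simp [List.getD, List.getElem?_set_ne hkj]
    have e2 : (pvStepB val S k).2.getD j [] = S.2.getD j [] := by
      simp only [pvStepB]
      simp [List.getD, List.getElem?_set_ne hkj]
    exact ⟨e1.trans (hpres j (by omega)).1, e2.trans (hpres j (by omega)).2⟩

-- ===== VERDICT (by name: the statement is the Claim_ definition above) =====
theorem clearArray_zeroBound_spec : Claim_equal_clearArray_zeroBound := by
  intro xval yval val _hdom hpre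
  obtain ⟨hlen, hrow⟩ := hpre
  show clearArray_zeroBound xval yval val = clearArray_zeroBound_alt xval yval val
  rw [portA_def, portB_def]
  exact (outer_inv xval yval val hlen hrow xval.length (Nat.le_refl _)).1
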